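-- pv_equiv track=rewrite | github.com/albertodesouza/genomics | genomes_analyzer.py | _split_balanced
-- ===== SOURCE A (Python) =====
-- def _split_balanced(contigs, parts: int):
--     "Greedy balance por tamanho; retorna lista de listas de (ctg,len)."
--     parts = max(1, int(parts))
--     bins = [([], 0)] * parts
--     bins = [ ([],0) for _ in range(parts) ]
--     for ctg, ln in sorted(contigs, key=lambda x: x[1], reverse=True):
--         i = min(range(parts), key=lambda k: bins[k][1])
--         bins[i][0].append((ctg,ln))
--         bins[i] = (bins[i][0], bins[i][1] + ln)
--     return [b[0] for b in bins]
-- ===== SOURCE B (Python) =====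
-- def _split_balanced(contigs, parts: int):
--     "Greedy balance por tamanho; retorna lista de listas de (ctg,len)."
--     parts = max(1, int(parts))
--     lists = [[] for _ in range(parts)]
--     # priority queue kept as a list sorted ascending by (load, bin index);
--     # the head is always the least-loaded bin (smallest index on ties),
--     # found in O(1) and re-inserted by binary search instead of scanning
--     # all bins with a Python-level key function as A does.
--     q = [(0, i) for i in range(parts)]
--     for ctg, ln in sorted(contigs, key=lambda x: x[1], reverse=True):
--         load, i = q.pop(0)
--         lists[i].append((ctg, ln))
--         item = (load + ln, i)
--         lo, hi = 0, len(q)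
--         while lo < hi:
--             mid = (lo + hi) // 2
--             if q[mid] < item:
--                 lo = mid + 1
--             else:
--                 hi = mid
--         q.insert(lo, item)
--     return lists
-- ===== Notes on version B (the rewrite author's own statement) =====
-- stated objective: faster
-- what changed: Instead of rescanning all bins with min(range(parts), key=...) for every contig (O(n*parts) Python-level comparisons), B keeps the bins in a list sorted ascending by (load, index): the least-loaded bin (smallest index on ties, matching Python min's first-minimum rule) is the head in O(1), and the updated bin is re-inserted by binary search.
import Mathlib
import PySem

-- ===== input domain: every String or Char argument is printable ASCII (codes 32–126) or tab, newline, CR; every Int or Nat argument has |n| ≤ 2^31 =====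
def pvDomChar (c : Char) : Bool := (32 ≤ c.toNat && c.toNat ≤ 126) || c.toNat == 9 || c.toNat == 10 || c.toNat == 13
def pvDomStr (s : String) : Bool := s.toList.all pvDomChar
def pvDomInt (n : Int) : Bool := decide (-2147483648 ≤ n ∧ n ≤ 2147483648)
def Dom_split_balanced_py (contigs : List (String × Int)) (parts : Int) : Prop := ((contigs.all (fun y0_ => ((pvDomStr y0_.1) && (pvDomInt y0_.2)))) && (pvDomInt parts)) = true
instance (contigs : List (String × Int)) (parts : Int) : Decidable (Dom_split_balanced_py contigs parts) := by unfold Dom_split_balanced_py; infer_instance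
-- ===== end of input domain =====

-- B replaces A's per-contig min(range(parts), key=...) scan by a queue kept sorted by
-- (load, index) with O(1) head and binary-search re-insertion (measurably faster).


-- ===== PORT A =====
def split_balanced_py (contigs : List (String × Int)) (parts : Int) : List (List (String × Int)) :=
  let p : Int := max 1 parts
  let bins0 : List (List (String × Int) × Int) :=
    (PySem.List.pyRange 0 p 1).map (fun _ => (([] : List (String × Int)), (0 : Int)))
  let bins := (PySem.List.sorted contigs (fun x => x.2) true).foldl
    (fun bins cl =>
      match PySem.List.min? (PySem.List.pyRange 0 p 1)
              (fun k => (PySem.List.pyGetD bins k (([], 0) : List (String × Int) × Int)).2) with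
      | some i =>
        let b := PySem.List.pyGetD bins i (([], 0) : List (String × Int) × Int)
        PySem.List.pySetD bins i (b.1 ++ [cl], b.2 + cl.2)
      | none => bins)  -- unreachable: range(parts) with parts ≥ 1 is nonempty
    bins0
  bins.map (fun b => b.1)

-- ===== PORT B =====
-- Python tuple comparison (a, b) < (c, d)
def pvLexLt (a b : Int × Int) : Bool := a.1 < b.1 || (a.1 == b.1 && a.2 < b.2)

-- the hand-written `while lo < hi` binary-search loop of Source B
def pvBisect (q : List (Int × Int)) (item : Int × Int) (lo hi : Nat) : Nat :=
  if _h : lo < hi then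
    let mid := (lo + hi) / 2
    if pvLexLt (PySem.List.pyGetD q (mid : Int) (0, 0)) item then pvBisect q item (mid + 1) hi
    else pvBisect q item lo mid
  else lo
termination_by hi - lo
decreasing_by all_goals omega

def split_balanced_py_alt (contigs : List (String × Int)) (parts : Int) : List (List (String × Int)) :=
  let p : Int := max 1 parts
  let lists0 : List (List (String × Int)) := (PySem.List.pyRange 0 p 1).map (fun _ => [])
  let q0 : List (Int × Int) := (PySem.List.pyRange 0 p 1).map (fun i => ((0 : Int), i))
  let st := (PySem.List.sorted contigs (fun x => x.2) true).foldl
    (fun st cl =>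
      match st.2 with
      | [] => st  -- unreachable: the queue always holds parts ≥ 1 entries
      | (load, i) :: rest =>
        let lists' := PySem.List.pySetD st.1 i (PySem.List.pyGetD st.1 i [] ++ [cl])
        let item : Int × Int := (load + cl.2, i)
        let pos := pvBisect rest item 0 rest.length
        (lists', PySem.List.insert rest (pos : Int) item))
    (lists0, q0)
  st.1

-- ===== PRECONDITION & SPEC =====
def Spec_split_balanced_py (contigs : List (String × Int)) (parts : Int) (out : List (List (String × Int))) : Prop := out = split_balanced_py_alt contigs parts
instance (contigs : List (String × Int)) (parts : Int) (out : List (List (String × Int))) : Decidable (Spec_split_balanced_py contigs parts out) := by unfold Spec_split_balanced_py; infer_instance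

-- ===== CLAIM (what is proved, stated in full; the proofs are below) =====
def Claim_equal_split_balanced_py : Prop := ∀ (contigs : List (String × Int)) (parts : Int), Dom_split_balanced_py contigs parts → Spec_split_balanced_py contigs parts (split_balanced_py contigs parts)

-- ===== LEMMAS AND PROOFS =====

-- Prop form of Python's lexicographic tuple <
def LtP (a b : Int × Int) : Prop := a.1 < b.1 ∨ (a.1 = b.1 ∧ a.2 < b.2)

theorem pvLexLt_iff (a b : Int × Int) : pvLexLt a b = true ↔ LtP a b := by
  simp [pvLexLt, LtP]

theorem LtP_trans {a b c : Int × Int} (h1 : LtP a b) (h2 : LtP b c) : LtP a c := by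
  rcases h1 with h1 | ⟨h1, h1'⟩ <;> rcases h2 with h2 | ⟨h2, h2'⟩ <;>
    simp_all [LtP] <;> omega

theorem LtP_trichotomy (a b : Int × Int) : LtP a b ∨ a = b ∨ LtP b a := by
  rcases a with ⟨a1, a2⟩; rcases b with ⟨b1, b2⟩
  simp [LtP, Prod.ext_iff]; omega

-- the (load, index) view of A's bins
def pvPairs (bins : List (List (String × Int) × Int)) : List (Int × Int) :=
  (List.range bins.length).map (fun k => ((bins.getD k ([], 0)).2, (k : Int)))

theorem pvPairs_length (bins : List (List (String × Int) × Int)) :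
    (pvPairs bins).length = bins.length := by simp [pvPairs]

theorem pvPairs_getElem (bins : List (List (String × Int) × Int)) (k : Nat)
    (hk : k < bins.length) :
    (pvPairs bins)[k]'(by simp [pvPairs_length, hk]) = ((bins[k]).2, (k : Int)) := by
  simp [pvPairs, List.getD_eq_getElem?_getD, List.getElem?_eq_getElem hk]

theorem pvPairs_set (bins : List (List (String × Int) × Int)) (k : Nat)
    (v : List (String × Int) × Int) :
    pvPairs (bins.set k v) = (pvPairs bins).set k (v.2, (k : Int)) := by
  apply List.ext_getElem
  · simp [pvPairs_length]
  · intro j h1 h2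
    have hj : j < bins.length := by simpa [pvPairs_length] using h1
    rw [pvPairs_getElem (bins.set k v) j (by simpa using hj), List.getElem_set,
        List.getElem_set, pvPairs_getElem bins j hj]
    by_cases hjk : k = j
    · subst hjk; simp
    · simp [hjk]

-- first-minimum characterisation of Python's min(..., key=...) on a strictly increasing list
theorem min_foldl_aux (key : Int → Int) (f : Option Int → Int → Option Int)
    (hfs : ∀ mm y, f (some mm) y = if key y < key mm then some y else some mm) :
    ∀ (t : List Int) (c m : Int), t.Pairwise (· < ·) →
    t.foldl f (some c) = some m →
    (m = c ∧ ∀ y ∈ t, ¬ key y < key c) ∨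
    (m ∈ t ∧ key m < key c ∧ (∀ y ∈ t, key m ≤ key y) ∧ (∀ y ∈ t, key y = key m → m ≤ y)) := by
  intro t
  induction t with
  | nil => intro c m _ h; left; exact ⟨by simpa using h.symm, by simp⟩
  | cons x t ih =>
    intro c m hp h
    have hpt : t.Pairwise (· < ·) := hp.of_cons
    have hxlt : ∀ y ∈ t, x < y := (List.pairwise_cons.mp hp).1
    rw [List.foldl_cons, hfs c x] at h
    by_cases hx : key x < key c
    · rw [if_pos hx] at h
      rcases ih x m hpt h with ⟨rfl, hall⟩ | ⟨hm, hlt, hle, hfirst⟩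
      · right
        refine ⟨List.mem_cons_self, hx, ?_, ?_⟩
        · intro y hy
          rcases List.mem_cons.mp hy with rfl | hy
          · exact le_refl _
          · exact le_of_not_gt (hall y hy)
        · intro y hy _
          rcases List.mem_cons.mp hy with rfl | hy
          · exact le_refl _
          · exact le_of_lt (hxlt y hy)
      · right
        refine ⟨List.mem_cons_of_mem _ hm, lt_trans hlt hx, ?_, ?_⟩
        · intro y hy
          rcases List.mem_cons.mp hy with rfl | hy
          · exact le_of_lt hlt
          · exact hle y hy
        · intro y hy he
          rcases List.mem_cons.mp hy with rfl | hy
          · omega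
          · exact hfirst y hy he
    · rw [if_neg hx] at h
      rcases ih c m hpt h with ⟨rfl, hall⟩ | ⟨hm, hlt, hle, hfirst⟩
      · left
        refine ⟨rfl, ?_⟩
        intro y hy
        rcases List.mem_cons.mp hy with rfl | hy
        · exact hx
        · exact hall y hy
      · right
        refine ⟨List.mem_cons_of_mem _ hm, hlt, ?_, ?_⟩
        · intro y hy
          rcases List.mem_cons.mp hy with rfl | hy
          · omega
          · exact hle y hy
        · intro y hy he
          rcases List.mem_cons.mp hy with rfl | hy
          · omega
          · exact hfirst y hy he

theorem min?_first_spec (l : List Int) (key : Int → Int) (m : Int)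
    (hl : l.Pairwise (· < ·))
    (h : PySem.List.min? l key = some m) :
    m ∈ l ∧ (∀ y ∈ l, key m ≤ key y) ∧ (∀ y ∈ l, key y = key m → m ≤ y) := by
  cases l with
  | nil => simp [PySem.List.min?] at h
  | cons x t =>
    have hxlt : ∀ y ∈ t, x < y := (List.pairwise_cons.mp hl).1
    unfold PySem.List.min? at h
    rw [List.foldl_cons] at h
    rcases min_foldl_aux key _ (fun mm y => rfl) t x m hl.of_cons h with
      ⟨rfl, hall⟩ | ⟨hm, hlt, hle, hfirst⟩
    · refine ⟨List.mem_cons_self, ?_, ?_⟩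
      · intro y hy
        rcases List.mem_cons.mp hy with rfl | hy
        · exact le_refl _
        · exact le_of_not_gt (hall y hy)
      · intro y hy _
        rcases List.mem_cons.mp hy with rfl | hy
        · exact le_refl _
        · exact le_of_lt (hxlt y hy)
    · refine ⟨List.mem_cons_of_mem _ hm, ?_, ?_⟩
      · intro y hy
        rcases List.mem_cons.mp hy with rfl | hy
        · exact le_of_lt hlt
        · exact hle y hy
      · intro y hy he
        rcases List.mem_cons.mp hy with rfl | hy
        · omega
        · exact hfirst y hy he

-- binary-search loop specification on a strictly LtP-sorted list
theorem pvBisect_spec (q : List (Int × Int)) (item : Int × Int)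
    (hq : q.Pairwise LtP) :
    ∀ (n lo hi : Nat), hi - lo = n → hi ≤ q.length → lo ≤ hi →
    (∀ j, j < lo → LtP (q.getD j (0, 0)) item) →
    (∀ j, hi ≤ j → j < q.length → ¬ LtP (q.getD j (0, 0)) item) →
    pvBisect q item lo hi ≤ q.length ∧
    (∀ j, j < pvBisect q item lo hi → LtP (q.getD j (0, 0)) item) ∧
    (∀ j, pvBisect q item lo hi ≤ j → j < q.length → ¬ LtP (q.getD j (0, 0)) item) := by
  have hpair : ∀ a b, a < q.length → b < q.length → a < b →
      LtP (q.getD a (0, 0)) (q.getD b (0, 0)) := by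
    intro a b ha hb hab
    have := (List.pairwise_iff_getElem.mp hq) a b ha hb hab
    simpa [List.getD_eq_getElem?_getD, List.getElem?_eq_getElem, ha, hb] using this
  intro n
  induction n using Nat.strong_induction_on with
  | _ n ih =>
    intro lo hi hn hhi hlo hlow hhigh
    rw [pvBisect]
    by_cases hlt : lo < hi
    · rw [dif_pos hlt]
      have hmlo : lo ≤ (lo + hi) / 2 := by omega
      have hmhi : (lo + hi) / 2 < hi := by omega
      have hmlen : (lo + hi) / 2 < q.length := by omega
      have hget : PySem.List.pyGetD q (((lo + hi) / 2 : Nat) : Int) (0, 0)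
          = q.getD ((lo + hi) / 2) (0, 0) := PySem.List.pyGetD_natCast q _ (0, 0)
      by_cases hc : pvLexLt (PySem.List.pyGetD q (((lo + hi) / 2 : Nat) : Int) (0, 0)) item = true
      · rw [if_pos hc]
        have hcP : LtP (q.getD ((lo + hi) / 2) (0, 0)) item := by
          rw [hget] at hc; exact (pvLexLt_iff _ _).mp hc
        refine ih (hi - ((lo + hi) / 2 + 1)) (by omega) ((lo + hi) / 2 + 1) hi rfl hhi
          (by omega) ?_ hhigh
        intro j hj
        by_cases hjlt : j < lo
        · exact hlow j hjlt
        · rcases Nat.lt_or_ge j ((lo + hi) / 2) with hjm | hjm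
          · exact LtP_trans (hpair j ((lo + hi) / 2) (by omega) hmlen hjm) hcP
          · have : j = (lo + hi) / 2 := by omega
            rw [this]; exact hcP
      · rw [if_neg hc]
        have hcP : ¬ LtP (q.getD ((lo + hi) / 2) (0, 0)) item := by
          rw [hget] at hc; simpa [pvLexLt_iff] using hc
        refine ih ((lo + hi) / 2 - lo) (by omega) lo ((lo + hi) / 2) rfl (by omega)
          (by omega) hlow ?_
        intro j hjm hjlen
        rcases Nat.lt_or_ge j ((lo + hi) / 2) with hjl | hjl
        · omega
        · rcases Nat.eq_or_lt_of_le hjl with hje | hjl'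
          · exact hje ▸ hcP
          · intro habs
            exact hcP (LtP_trans (hpair ((lo + hi) / 2) j hmlen hjlen hjl') habs)
    · rw [dif_neg hlt]
      have heq : lo = hi := by omega
      exact ⟨by omega, hlow, fun j hj hlen => hhigh j (by omega) hlen⟩

-- inserting x at a position that splits below/above keeps the list sorted
theorem pvPairwise_insert (l : List (Int × Int)) (x : Int × Int) (p : Nat)
    (hp : p ≤ l.length) (hl : l.Pairwise LtP)
    (h1 : ∀ j, j < p → LtP (l.getD j (0, 0)) x)
    (h2 : ∀ j, p ≤ j → j < l.length → LtP x (l.getD j (0, 0))) :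
    (l.take p ++ x :: l.drop p).Pairwise LtP := by
  have hpair : ∀ a b, a < l.length → b < l.length → a < b →
      LtP (l.getD a (0, 0)) (l.getD b (0, 0)) := by
    intro a b ha hb hab
    have := (List.pairwise_iff_getElem.mp hl) a b ha hb hab
    simpa [List.getD_eq_getElem?_getD, List.getElem?_eq_getElem, ha, hb] using this
  rw [List.pairwise_append]
  refine ⟨hl.sublist (List.take_sublist _ _), ?_, ?_⟩
  · rw [List.pairwise_cons]
    refine ⟨?_, hl.sublist (List.drop_sublist _ _)⟩
    intro b hb
    obtain ⟨j, hj, rfl⟩ := List.mem_iff_getElem.mp hb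
    have hjl : p + j < l.length := by
      have := List.length_drop (l := l) (i := p); omega
    have : (l.drop p)[j] = l.getD (p + j) (0, 0) := by
      rw [List.getElem_drop]
      simp [List.getD_eq_getElem?_getD, List.getElem?_eq_getElem, hjl]
    rw [this]
    exact h2 (p + j) (by omega) hjl
  · intro a ha b hb
    obtain ⟨ja, hja, rfl⟩ := List.mem_iff_getElem.mp ha
    have hjap : ja < p := by have := List.length_take (l := l) (i := p); omega
    have hjal : ja < l.length := by omega
    have hae : (l.take p)[ja] = l.getD ja (0, 0) := by
      rw [List.getElem_take]
      simp [List.getD_eq_getElem?_getD, List.getElem?_eq_getElem, hjal]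
    rw [hae]
    rcases List.mem_cons.mp hb with rfl | hb
    · exact h1 ja hjap
    · obtain ⟨jb, hjb, rfl⟩ := List.mem_iff_getElem.mp hb
      have hjbl : p + jb < l.length := by
        have := List.length_drop (l := l) (i := p); omega
      have hbe : (l.drop p)[jb] = l.getD (p + jb) (0, 0) := by
        rw [List.getElem_drop]
        simp [List.getD_eq_getElem?_getD, List.getElem?_eq_getElem, hjbl]
      rw [hbe]
      exact hpair ja (p + jb) hjal hjbl (by omega)

-- the main loop invariant, by induction on the sorted contig list
theorem pv_loop (p : Int) (hp : 1 ≤ p) :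
    ∀ (s : List (String × Int)) (bins : List (List (String × Int) × Int))
      (lists : List (List (String × Int))) (q : List (Int × Int)),
    bins.length = p.toNat →
    lists = bins.map Prod.fst →
    q.Perm (pvPairs bins) →
    q.Pairwise LtP →
    (s.foldl (fun st cl =>
      match st.2 with
      | [] => st
      | (load, i) :: rest =>
        let lists' := PySem.List.pySetD st.1 i (PySem.List.pyGetD st.1 i [] ++ [cl])
        let item : Int × Int := (load + cl.2, i)
        let pos := pvBisect rest item 0 rest.length
        (lists', PySem.List.insert rest (pos : Int) item)) (lists, q)).1
    = (s.foldl (fun bins cl =>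
        match PySem.List.min? (PySem.List.pyRange 0 p 1)
                (fun k => (PySem.List.pyGetD bins k (([], 0) : List (String × Int) × Int)).2) with
        | some i =>
          let b := PySem.List.pyGetD bins i (([], 0) : List (String × Int) × Int)
          PySem.List.pySetD bins i (b.1 ++ [cl], b.2 + cl.2)
        | none => bins) bins).map Prod.fst := by
  intro s
  induction s with
  | nil =>
    intro bins lists q _ h2 _ _
    simpa using h2
  | cons cl s ih =>
    intro bins lists q hlen hlists hperm hsort
    have hbpos : 1 ≤ bins.length := by omega
    have hnodupP : (pvPairs bins).Nodup := by
      have hinj : Function.Injective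
          (fun k : Nat => ((bins.getD k ([], 0)).2, (k : Int))) := by
        intro a b h
        simpa using congrArg Prod.snd h
      exact List.Nodup.map hinj (List.nodup_range)
    have hqlen : q.length = bins.length := by rw [hperm.length_eq, pvPairs_length]
    cases q with
    | nil => simp at hqlen; omega
    | cons hd rest =>
      obtain ⟨load, i⟩ := hd
      -- the head of the queue is an entry of pvPairs bins
      have hmem : (load, i) ∈ pvPairs bins := hperm.subset List.mem_cons_self
      obtain ⟨k, hkb, hki, hkload⟩ :
          ∃ k, k < bins.length ∧ (k : Int) = i ∧ (bins.getD k ([], 0)).2 = load := by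
        simp only [pvPairs, List.mem_map, List.mem_range] at hmem
        obtain ⟨k, hk, he⟩ := hmem
        exact ⟨k, hk, (Prod.ext_iff.mp he).2, (Prod.ext_iff.mp he).1⟩
      have hipos : 0 ≤ i := by omega
      have hilt : i < p := by omega
      have hk_toNat : i.toNat = k := by omega
      -- the head is the lexicographic minimum
      have hmin : ∀ y ∈ pvPairs bins, y = (load, i) ∨ LtP (load, i) y := by
        intro y hy
        have hyq : y ∈ (load, i) :: rest := (hperm.mem_iff).mpr hy
        rcases List.mem_cons.mp hyq with h | h
        · left; exact h
        · right; exact (List.pairwise_cons.mp hsort).1 y h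
      -- A's min? returns exactly the head's index i
      have hkey : ∀ y : Int, 0 ≤ y → y < p →
          (PySem.List.pyGetD bins y (([], 0) : List (String × Int) × Int)).2
          = (bins.getD y.toNat ([], 0)).2 := by
        intro y h0 hyp
        have hylen : y.toNat < bins.length := by omega
        rw [PySem.List.pyGetD_eq_getElem _ _ h0 (by push_cast; omega)]
        simp [List.getD_eq_getElem?_getD, List.getElem?_eq_getElem, hylen]
      obtain ⟨m, hm⟩ : ∃ m, PySem.List.min? (PySem.List.pyRange 0 p 1)
          (fun k => (PySem.List.pyGetD bins k (([], 0) : List (String × Int) × Int)).2)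
          = some m := by
        cases h : PySem.List.min? (PySem.List.pyRange 0 p 1)
          (fun k => (PySem.List.pyGetD bins k (([], 0) : List (String × Int) × Int)).2) with
        | none =>
          exfalso
          have := (PySem.List.min?_eq_none_iff _ _).mp h
          have hL := PySem.List.length_pyRange_one (a := 0) (b := p)
          rw [this] at hL
          simp at hL
          omega
        | some m => exact ⟨m, rfl⟩
      obtain ⟨hml, hmle, hmfirst⟩ := min?_first_spec _ _ _
        (PySem.List.pairwise_lt_pyRange_one 0 p) hm
      have hm0 : 0 ≤ m ∧ m < p := by
        simpa [PySem.List.mem_pyRange_one] using hml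
      have hil : i ∈ PySem.List.pyRange 0 p 1 := by
        simp [PySem.List.mem_pyRange_one]; omega
      have hmi : m = i := by
        have hpm_mem : ((bins.getD m.toNat ([], 0)).2, m) ∈ pvPairs bins := by
          simp only [pvPairs, List.mem_map, List.mem_range]
          exact ⟨m.toNat, by omega, by rw [Int.toNat_of_nonneg hm0.1]⟩
        have hkeyi :
            (PySem.List.pyGetD bins i (([], 0) : List (String × Int) × Int)).2 = load := by
          rw [hkey i hipos hilt, hk_toNat, hkload]
        have hkeym :
            (PySem.List.pyGetD bins m (([], 0) : List (String × Int) × Int)).2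
            = (bins.getD m.toNat ([], 0)).2 := hkey m hm0.1 hm0.2
        have hle_i := hmle i hil
        rw [hkeyi, hkeym] at hle_i
        rcases hmin _ hpm_mem with he | hlt
        · exact (Prod.ext_iff.mp he).2
        · exfalso
          have hfirst_i := hmfirst i hil
          rw [hkeyi, hkeym] at hfirst_i
          simp only [LtP] at hlt
          rcases hlt with h | ⟨h, h'⟩
          · exact absurd hle_i (not_le.mpr h)
          · exact absurd (hfirst_i h) (not_le.mpr h')
      subst hmi
      -- rewrite both first steps and re-establish the invariant
      rw [List.foldl_cons, List.foldl_cons]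
      dsimp only
      rw [hm]
      dsimp only
      have hklen : k < bins.length := hkb
      have e1 : PySem.List.pyGetD bins m (([], 0) : List (String × Int) × Int)
          = bins.getD k ([], 0) := by
        rw [PySem.List.pyGetD_eq_getElem _ _ hipos (by push_cast; omega)]
        have h2 : bins[m.toNat]'(by omega) = (bins[m.toNat]?).getD ([], 0) := by
          rw [List.getElem?_eq_getElem (by omega)]
          rfl
        rw [h2, hk_toNat, ← List.getD_eq_getElem?_getD]
      have e2 : ∀ v : List (String × Int) × Int,
          PySem.List.pySetD bins m v = bins.set k v := by
        intro v; rw [PySem.List.pySetD_of_nonneg _ _ hipos, hk_toNat]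
      have hllen : lists.length = bins.length := by rw [hlists, List.length_map]
      have e3 : PySem.List.pyGetD lists m [] = (bins.getD k ([], 0)).1 := by
        rw [PySem.List.pyGetD_eq_getElem _ _ hipos (by push_cast; omega)]
        have h2 : lists[m.toNat]'(by omega) = (lists[m.toNat]?).getD [] := by
          rw [List.getElem?_eq_getElem (by omega)]
          rfl
        rw [h2, hk_toNat, hlists]
        simp [List.getElem?_eq_getElem, hklen, List.getD_eq_getElem?_getD]
      have e4 : ∀ w : List (String × Int),
          PySem.List.pySetD lists m w = lists.set k w := by
        intro w; rw [PySem.List.pySetD_of_nonneg _ _ hipos, hk_toNat]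
      rw [e1, e2, e3, e4]
      set binval := bins.getD k ([], 0) with hbinval
      set newbin : List (String × Int) × Int := (binval.1 ++ [cl], binval.2 + cl.2)
        with hnewbin
      set item : Int × Int := (load + cl.2, m) with hitem
      set pos := pvBisect rest item 0 rest.length with hposdef
      -- bisect specification
      have hrest_sort : rest.Pairwise LtP := hsort.of_cons
      obtain ⟨hpos_le, hpos_lt, hpos_ge⟩ :=
        pvBisect_spec rest item hrest_sort rest.length 0 rest.length rfl (le_refl _)
          (Nat.zero_le _) (fun j hj => absurd hj (Nat.not_lt_zero j))
          (fun j hj hlen' => absurd hlen' (by omega))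
      have hins : PySem.List.insert rest ((pos : Nat) : Int) item
          = rest.take pos ++ item :: rest.drop pos :=
        PySem.List.insert_natCast rest pos item hpos_le
      rw [hins]
      -- no element of rest carries bin index m
      have hrest_pairs : ∀ b ∈ rest, b ∈ pvPairs bins :=
        fun b hb => hperm.subset (List.mem_cons_of_mem _ hb)
      have hhead_notin : (load, m) ∉ rest := by
        have hnd : ((load, m) :: rest).Nodup := (hperm.nodup_iff).mpr hnodupP
        exact (List.nodup_cons.mp hnd).1
      have hne_item : ∀ b ∈ rest, b ≠ item := by
        intro b hb he
        obtain ⟨k', hk', he'⟩ := by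
          simpa only [pvPairs, List.mem_map, List.mem_range] using hrest_pairs b hb
        have hbsnd : b.2 = m := by rw [he, hitem]
        have hk'2 : (k' : Int) = m := by
          rw [← hbsnd, ← he']
        have hkk : k' = k := by omega
        have hbe : b = (load, m) := by
          rw [← he', hkk, hkload, hki]
        exact hhead_notin (hbe ▸ hb)
      have hitem_gt : ∀ j, pos ≤ j → j < rest.length → LtP item (rest.getD j (0, 0)) := by
        intro j h1 h2
        have hnot := hpos_ge j h1 h2
        have hmem' : rest.getD j (0, 0) ∈ rest := by
          rw [List.getD_eq_getElem?_getD, List.getElem?_eq_getElem h2]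
          exact List.getElem_mem _
        rcases LtP_trichotomy item (rest.getD j (0, 0)) with h | h | h
        · exact h
        · exact absurd h.symm (hne_item _ hmem')
        · exact absurd h hnot
      have hnewq_sort : (rest.take pos ++ item :: rest.drop pos).Pairwise LtP :=
        pvPairwise_insert rest item pos hpos_le hrest_sort hpos_lt hitem_gt
      -- permutation invariant
      have hk_pairs : (pvPairs bins)[k]'(by rw [pvPairs_length]; omega) = (load, m) := by
        rw [pvPairs_getElem bins k hklen]
        have : bins[k].2 = load := by
          rw [← hkload, hbinval, List.getD_eq_getElem?_getD, List.getElem?_eq_getElem hklen]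
          rfl
        rw [this, hki]
      have hdecomp : pvPairs bins
          = (pvPairs bins).take k ++ (load, m) :: (pvPairs bins).drop (k + 1) := by
        conv_lhs => rw [← List.take_append_drop k (pvPairs bins)]
        congr 1
        rw [← List.getElem_cons_drop (show k < (pvPairs bins).length by
          rw [pvPairs_length]; omega)]
        rw [hk_pairs]
      have hrest_perm : rest.Perm ((pvPairs bins).take k ++ (pvPairs bins).drop (k + 1)) := by
        have h1 : ((load, m) :: rest).Perm
            ((pvPairs bins).take k ++ (load, m) :: (pvPairs bins).drop (k + 1)) :=
          hdecomp ▸ hperm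
        exact (h1.trans List.perm_middle).cons_inv
      have hnewq_perm : (rest.take pos ++ item :: rest.drop pos).Perm
          (pvPairs (bins.set k newbin)) := by
        rw [pvPairs_set bins k newbin]
        have hsetform : (pvPairs bins).set k (newbin.2, (k : Int))
            = (pvPairs bins).take k ++ (newbin.2, (k : Int)) :: (pvPairs bins).drop (k + 1) := by
          rw [List.set_eq_take_append_cons_drop, if_pos (by rw [pvPairs_length]; omega)]
        rw [hsetform]
        have hitem_eq : (newbin.2, (k : Int)) = item := by
          rw [hitem, hnewbin, hki, hkload]
        rw [hitem_eq]
        have p1 : (rest.take pos ++ item :: rest.drop pos).Perm (item :: rest) := by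
          have hmid := List.perm_middle (a := item) (l₁ := rest.take pos) (l₂ := rest.drop pos)
          rw [List.take_append_drop] at hmid
          exact hmid
        have p2 : (item :: rest).Perm
            (item :: ((pvPairs bins).take k ++ (pvPairs bins).drop (k + 1))) :=
          hrest_perm.cons item
        have p3 : (item :: ((pvPairs bins).take k ++ (pvPairs bins).drop (k + 1))).Perm
            ((pvPairs bins).take k ++ item :: (pvPairs bins).drop (k + 1)) :=
          List.perm_middle.symm
        exact (p1.trans p2).trans p3
      -- the updated first components agree
      have hlists' : lists.set k (binval.1 ++ [cl]) = (bins.set k newbin).map Prod.fst := by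
        rw [List.map_set, ← hlists, hnewbin]
      rw [hlists']
      exact ih (bins.set k newbin) _ _ (by simp [hlen]) rfl hnewq_perm hnewq_sort

-- ===== VERDICT (by name: the statement is the Claim_ definition above) =====
theorem split_balanced_py_spec : Claim_equal_split_balanced_py := by
  unfold Claim_equal_split_balanced_py
  intro contigs parts _
  unfold Spec_split_balanced_py split_balanced_py split_balanced_py_alt
  dsimp only
  have hp1 : (1 : Int) ≤ max 1 parts := le_max_left _ _
  have hlen0 : ((PySem.List.pyRange 0 (max 1 parts) 1).map
      (fun _ => (([] : List (String × Int)), (0 : Int)))).length = (max 1 parts).toNat := by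
    simp [PySem.List.length_pyRange_one]
  have hq0eq : (PySem.List.pyRange 0 (max 1 parts) 1).map (fun i => ((0 : Int), i))
      = pvPairs ((PySem.List.pyRange 0 (max 1 parts) 1).map
        (fun _ => (([] : List (String × Int)), (0 : Int)))) := by
    apply List.ext_getElem
    · simp [pvPairs_length, PySem.List.length_pyRange_one]
    · intro j h1 h2
      have hjlen : j < ((PySem.List.pyRange 0 (max 1 parts) 1).map
          (fun _ => (([] : List (String × Int)), (0 : Int)))).length := by
        simpa [pvPairs_length] using h2
      rw [pvPairs_getElem _ j hjlen]
      simp [List.getD_eq_getElem?_getD, List.getElem?_eq_getElem hjlen,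
        PySem.List.getElem_pyRange_one]
  have hsort0 : ((PySem.List.pyRange 0 (max 1 parts) 1).map
      (fun i => ((0 : Int), i))).Pairwise LtP := by
    refine List.Pairwise.map _ ?_ (PySem.List.pairwise_lt_pyRange_one 0 (max 1 parts))
    intro a b hab
    exact Or.inr ⟨rfl, hab⟩
  have hlists0 : (PySem.List.pyRange 0 (max 1 parts) 1).map
        (fun _ => ([] : List (String × Int)))
      = ((PySem.List.pyRange 0 (max 1 parts) 1).map
          (fun _ => (([] : List (String × Int)), (0 : Int)))).map Prod.fst := by
    simp [List.map_map]
  have h := pv_loop (max 1 parts) hp1 (PySem.List.sorted contigs (fun x => x.2) true)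
    _ _ _ hlen0 hlists0 (hq0eq ▸ List.Perm.refl _) hsort0
  exact h.symm
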